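-- pv_equiv track=rewrite | github.com/paulklemstine/factor | lean/demo/Pythagorean/quantum_gate_open_questions_demo.py | r6
-- ===== SOURCE A (Python) =====
-- import math
--
-- def r6(d: int) -> int:
--     """Count integer 6-vectors at norm d: r_6(d)."""
--     count = 0
--     s = int(math.isqrt(d)) + 1
--     for a in range(-s, s+1):
--         for b in range(-s, s+1):
--             for c in range(-s, s+1):
--                 rem = d - a*a - b*b - c*c
--                 if rem < 0:
--                     continue
--                 for e in range(-s, s+1):
--                     for f in range(-s, s+1):
--                         for g in range(-s, s+1):
--                             if e*e + f*f + g*g == rem: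
--                                 count += 1
--     return count
-- ===== SOURCE B (Python) =====
-- import math
--
-- def r6(d: int) -> int:
--     """Count integer 6-vectors at norm d: r_6(d)."""
--     s = math.isqrt(d) + 1
--     r3 = [0] * (d + 1)
--     for a in range(-s, s + 1):
--         for b in range(-s, s + 1):
--             for c in range(-s, s + 1):
--                 k = a * a + b * b + c * c
--                 if k <= d:
--                     r3[k] += 1
--     total = 0
--     for k in range(d + 1):
--         total += r3[k] * r3[d - k]
--     return total
-- ===== Notes on version B (the rewrite author's own statement) =====
-- stated objective: faster
-- what changed: Instead of six nested loops testing every 6-tuple, B tabulates r_3(k) (counts of 3-vectors of each norm up to d) in one triple loop and returns the convolution sum r_6(d) = sum_k r_3(k)*r_3(d-k).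
import Mathlib
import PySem

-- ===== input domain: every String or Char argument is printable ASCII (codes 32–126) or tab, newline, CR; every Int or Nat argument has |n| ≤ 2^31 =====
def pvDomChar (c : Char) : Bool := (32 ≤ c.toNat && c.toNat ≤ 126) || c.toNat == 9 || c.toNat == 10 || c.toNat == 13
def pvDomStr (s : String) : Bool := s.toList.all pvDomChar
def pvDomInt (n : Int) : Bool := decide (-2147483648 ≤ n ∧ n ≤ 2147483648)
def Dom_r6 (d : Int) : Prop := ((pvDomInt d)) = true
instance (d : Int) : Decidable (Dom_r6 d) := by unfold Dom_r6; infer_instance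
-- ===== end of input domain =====

-- B replaces A's six nested loops by tabulating r_3(k) once (one triple loop) and summing the
-- convolution r_6(d) = Σ_k r_3(k)·r_3(d-k); objective: faster (asymptotic).

-- ===== PORT A =====
-- math.isqrt(d) is ported as Nat.sqrt d.toNat, exact for d ≥ 0 (Pre_ excludes d < 0, where it raises).
def r6 (d : Int) : Int :=
  let s : Int := (Nat.sqrt d.toNat : Int) + 1
  (PySem.List.pyRange (-s) (s+1) 1).foldl (fun count a =>
    (PySem.List.pyRange (-s) (s+1) 1).foldl (fun count b =>
      (PySem.List.pyRange (-s) (s+1) 1).foldl (fun count c =>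
        let rem := d - a*a - b*b - c*c
        if rem < 0 then count
        else
          (PySem.List.pyRange (-s) (s+1) 1).foldl (fun count e =>
            (PySem.List.pyRange (-s) (s+1) 1).foldl (fun count f =>
              (PySem.List.pyRange (-s) (s+1) 1).foldl (fun count g =>
                if e*e + f*f + g*g == rem then count + 1 else count) count) count) count)
        count) count) 0

-- ===== PORT B =====
-- list index r3[k] (0 ≤ k ≤ d, always in range) is ported with List.set / List.getD.
def r6_alt (d : Int) : Int :=
  let s : Int := (Nat.sqrt d.toNat : Int) + 1
  let tab : List Int :=
    (PySem.List.pyRange (-s) (s+1) 1).foldl (fun t a =>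
      (PySem.List.pyRange (-s) (s+1) 1).foldl (fun t b =>
        (PySem.List.pyRange (-s) (s+1) 1).foldl (fun t c =>
          let k := a*a + b*b + c*c
          if k ≤ d then t.set k.toNat (t.getD k.toNat 0 + 1) else t) t) t)
      (List.replicate (d.toNat + 1) 0)
  (PySem.List.pyRange 0 (d+1) 1).foldl (fun total k =>
    total + tab.getD k.toNat 0 * tab.getD (d-k).toNat 0) 0

-- ===== PRECONDITION & SPEC =====
-- Pre_ excludes exactly d < 0, where Python A raises ValueError in math.isqrt.
def Pre_r6 (d : Int) : Prop := 0 ≤ d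
instance (d : Int) : Decidable (Pre_r6 d) := by unfold Pre_r6; infer_instance
def pvWitness_r6 : Int := 5
def Spec_r6 (d : Int) (out : Int) : Prop := out = r6_alt d
instance (d : Int) (out : Int) : Decidable (Spec_r6 d out) := by unfold Spec_r6; infer_instance

-- ===== CLAIM (what is proved, stated in full; the proofs are below) =====
def Claim_equal_r6 : Prop := ∀ (d : Int), Dom_r6 d → Pre_r6 d → Spec_r6 d (r6 d)

-- ===== LEMMAS AND PROOFS =====

-- squared norm of a triple
def pvQ (x : Int × Int × Int) : Int := x.1*x.1 + x.2.1*x.2.1 + x.2.2*x.2.2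

-- the list of all triples drawn from l (the flattening of the three nested loops)
def pvT (l : List Int) : List (Int × Int × Int) :=
  l.flatMap (fun a => l.flatMap (fun b => l.map (fun c => (a, b, c))))

theorem pvQ_def (x : Int × Int × Int) : x.1*x.1 + x.2.1*x.2.1 + x.2.2*x.2.2 = pvQ x := rfl

-- number of triples from l of squared norm k
def pvCnt (l : List Int) (k : Int) : Int :=
  ((pvT l).map (fun x => if pvQ x == k then (1:Int) else 0)).sum

theorem pvQ_nonneg (x : Int × Int × Int) : 0 ≤ pvQ x := by
  unfold pvQ; nlinarith [mul_self_nonneg x.1, mul_self_nonneg x.2.1, mul_self_nonneg x.2.2]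

theorem pvCnt_neg (l : List Int) (k : Int) (hk : k < 0) : pvCnt l k = 0 := by
  unfold pvCnt
  apply List.sum_eq_zero
  intro y hy
  obtain ⟨x, _, rfl⟩ := List.mem_map.mp hy
  have := pvQ_nonneg x
  simp only [beq_iff_eq, ite_eq_right_iff]
  intro h; omega

-- counting fold = sum of 0/1 indicators
theorem pv_foldl_count {α : Type} (p : α → Bool) :
    ∀ (l : List α) (c : Int),
      l.foldl (fun c x => if p x then c + 1 else c) c
        = c + (l.map (fun x => if p x then (1:Int) else 0)).sum := by
  intro l
  induction l with
  | nil => simp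
  | cons x t ih =>
    intro c
    simp only [List.foldl_cons, List.map_cons, List.sum_cons, ih]
    split <;> ring

-- accumulating fold = sum
theorem pv_foldl_add {α : Type} (m : α → Int) :
    ∀ (l : List α) (c : Int),
      l.foldl (fun c x => c + m x) c = c + (l.map m).sum := by
  intro l
  induction l with
  | nil => simp
  | cons x t ih =>
    intro c
    simp only [List.foldl_cons, List.map_cons, List.sum_cons, ih]
    ring

-- accumulating fold with a skip branch
theorem pv_foldl_skip {α : Type} (p : α → Prop) [DecidablePred p] (m : α → Int) :
    ∀ (l : List α) (c : Int),
      l.foldl (fun c x => if p x then c else c + m x) c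
        = c + (l.map (fun x => if p x then 0 else m x)).sum := by
  intro l
  induction l with
  | nil => simp
  | cons x t ih =>
    intro c
    simp only [List.foldl_cons, List.map_cons, List.sum_cons, ih]
    split <;> ring

-- sum over the flattened triple list = nested sums
theorem pv_sum_flatMap {α β : Type} (h : α → List β) (f : β → Int) :
    ∀ (l : List α),
      ((l.flatMap h).map f).sum = (l.map (fun a => ((h a).map f).sum)).sum := by
  intro l
  induction l with
  | nil => simp
  | cons x t ih => simp [ih]

theorem pv_sum_T (l : List Int) (f : Int × Int × Int → Int) :
    ((pvT l).map f).sum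
      = (l.map (fun a => (l.map (fun b => (l.map (fun c => f (a, b, c))).sum)).sum)).sum := by
  unfold pvT
  rw [pv_sum_flatMap]
  congr 1
  apply List.map_congr_left
  intro a _
  rw [pv_sum_flatMap]
  congr 1
  apply List.map_congr_left
  intro b _
  simp [List.map_map]
  rfl

-- ===== A-side characterisation =====
theorem pvCnt_nested (l : List Int) (k : Int) :
    pvCnt l k
      = (l.map (fun e => (l.map (fun f => (l.map (fun g =>
          if e*e + f*f + g*g == k then (1:Int) else 0)).sum)).sum)).sum := by
  unfold pvCnt
  rw [pv_sum_T]
  rfl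

theorem r6_eq_sum (d : Int) :
    r6 d = ((pvT (PySem.List.pyRange (-((Nat.sqrt d.toNat : Int) + 1))
                   (((Nat.sqrt d.toNat : Int) + 1) + 1) 1)).map
              (fun x => pvCnt (PySem.List.pyRange (-((Nat.sqrt d.toNat : Int) + 1))
                   (((Nat.sqrt d.toNat : Int) + 1) + 1) 1) (d - pvQ x))).sum := by
  generalize hl : PySem.List.pyRange (-((Nat.sqrt d.toNat : Int) + 1))
                   (((Nat.sqrt d.toNat : Int) + 1) + 1) 1 = l
  simp only [r6]
  rw [hl]
  simp only [pv_foldl_count, pv_foldl_add, pv_foldl_skip, zero_add]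
  rw [pv_sum_T]
  congr 1
  apply List.map_congr_left
  intro a _
  congr 1
  apply List.map_congr_left
  intro b _
  congr 1
  apply List.map_congr_left
  intro c _
  by_cases h : d - a*a - b*b - c*c < 0
  · rw [if_pos h, pvCnt_neg]
    · simp [pvQ]; omega
  · rw [if_neg h, pvCnt_nested]
    have he : d - a*a - b*b - c*c = d - pvQ (a, b, c) := by simp [pvQ]; ring
    rw [he]

-- ===== B-side: the table holds pvCnt =====
theorem pv_foldl_T (l : List Int) (F : Int → Int → Int → List Int → List Int) (t0 : List Int) :
    l.foldl (fun t a => l.foldl (fun t b => l.foldl (fun t c => F a b c t) t) t) t0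
      = (pvT l).foldl (fun t x => F x.1 x.2.1 x.2.2 t) t0 := by
  unfold pvT
  simp only [List.foldl_flatMap, List.foldl_map]

theorem pv_tab_inv (d : Int) :
    ∀ (ts : List (Int × Int × Int)) (t0 : List Int) (j : Nat), j < t0.length → (j : Int) ≤ d →
      (ts.foldl (fun t x =>
          if pvQ x ≤ d then t.set (pvQ x).toNat (t.getD (pvQ x).toNat 0 + 1) else t) t0).getD j 0
        = t0.getD j 0 + (ts.map (fun x => if pvQ x == (j : Int) then (1:Int) else 0)).sum := by
  intro ts
  induction ts with
  | nil => intro t0 j hj hdj; simp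
  | cons x ts ih =>
    intro t0 j hj hdj
    have hq0 := pvQ_nonneg x
    simp only [List.foldl_cons, List.map_cons, List.sum_cons]
    by_cases hq : pvQ x ≤ d
    · rw [if_pos hq]
      rw [ih _ j (by simpa using hj) hdj]
      by_cases hxj : pvQ x = (j : Int)
      · have hn : (pvQ x).toNat = j := by omega
        rw [hn]
        rw [List.getD_eq_getElem?_getD, List.getElem?_set_self hj]
        simp only [Option.getD_some, hxj]
        simp
        ring

      · have hn : (pvQ x).toNat ≠ j := by omega
        rw [List.getD_eq_getElem?_getD, List.getElem?_set_ne hn, ← List.getD_eq_getElem?_getD]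
        have : (pvQ x == (j : Int)) = false := by simp [hxj]
        rw [this]
        simp
    · rw [if_neg hq]
      rw [ih _ j hj hdj]
      have : (pvQ x == (j : Int)) = false := by
        simp only [beq_eq_false_iff_ne, ne_eq]
        omega
      rw [this]
      simp

theorem r6_alt_eq_sum (d : Int) (hd : 0 ≤ d) :
    r6_alt d = ((PySem.List.pyRange 0 (d+1) 1).map
        (fun k => pvCnt (PySem.List.pyRange (-((Nat.sqrt d.toNat : Int) + 1))
                   (((Nat.sqrt d.toNat : Int) + 1) + 1) 1) k
                * pvCnt (PySem.List.pyRange (-((Nat.sqrt d.toNat : Int) + 1))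
                   (((Nat.sqrt d.toNat : Int) + 1) + 1) 1) (d - k))).sum := by
  generalize hl : PySem.List.pyRange (-((Nat.sqrt d.toNat : Int) + 1))
                   (((Nat.sqrt d.toNat : Int) + 1) + 1) 1 = l
  simp only [r6_alt]
  rw [hl]
  rw [pv_foldl_T l (fun a b c t =>
        if a*a + b*b + c*c ≤ d then t.set (a*a + b*b + c*c).toNat
          (t.getD (a*a + b*b + c*c).toNat 0 + 1) else t)]
  simp only [pvQ_def]
  rw [pv_foldl_add]
  rw [zero_add]
  congr 1
  apply List.map_congr_left
  intro k hk
  have hk' := (PySem.List.mem_pyRange_one).mp hk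
  have htab : ∀ (m : Int), 0 ≤ m → m ≤ d →
      ((pvT l).foldl (fun t x =>
          if pvQ x ≤ d then t.set (pvQ x).toNat (t.getD (pvQ x).toNat 0 + 1) else t)
        (List.replicate (d.toNat + 1) 0)).getD m.toNat 0 = pvCnt l m := by
    intro m hm0 hmd
    rw [pv_tab_inv d (pvT l) _ m.toNat (by simp; omega) (by omega)]
    rw [List.getD_replicate 0 (by omega)]
    rw [zero_add]
    unfold pvCnt
    congr 1
    apply List.map_congr_left
    intro x _
    have hmm : ((m.toNat : Int)) = m := by omega
    rw [hmm]
  rw [htab k (by omega) (by omega), htab (d - k) (by omega) (by omega)]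

-- ===== the convolution identity =====
theorem pv_pick_not (f : Int → Int) (a : Int) :
    ∀ (R : List Int), a ∉ R →
      (R.map (fun k => (if a == k then (1:Int) else 0) * f k)).sum = 0 := by
  intro R hR
  apply List.sum_eq_zero
  intro y hy
  obtain ⟨k, hk, rfl⟩ := List.mem_map.mp hy
  have : a ≠ k := fun h => hR (h ▸ hk)
  simp [this]

theorem pv_pick_mem (f : Int → Int) (a : Int) :
    ∀ (R : List Int), R.Nodup → a ∈ R →
      (R.map (fun k => (if a == k then (1:Int) else 0) * f k)).sum = f a := by
  intro R
  induction R with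
  | nil => intro _ h; cases h
  | cons r R ih =>
    intro hnd hmem
    simp only [List.map_cons, List.sum_cons]
    rcases List.mem_cons.mp hmem with h | h
    · subst h
      rw [pv_pick_not f a R (List.nodup_cons.mp hnd).1]
      simp
    · have hne : a ≠ r := by
        intro he; subst he
        exact (List.nodup_cons.mp hnd).1 h
      rw [ih (List.nodup_cons.mp hnd).2 h]
      simp [hne]

theorem pv_regroup (d : Int) (l : List Int) :
    ∀ (L : List (Int × Int × Int)),
      (L.map (fun x => pvCnt l (d - pvQ x))).sum
        = ((PySem.List.pyRange 0 (d+1) 1).map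
            (fun k => ((L.map (fun x => if pvQ x == k then (1:Int) else 0)).sum)
                      * pvCnt l (d - k))).sum := by
  intro L
  induction L with
  | nil =>
    simp only [List.map_nil, List.sum_nil]
    symm
    apply List.sum_eq_zero
    intro y hy
    obtain ⟨k, _, rfl⟩ := List.mem_map.mp hy
    simp
  | cons x L ih =>
    simp only [List.map_cons, List.sum_cons]
    have hsplit :
        ((PySem.List.pyRange 0 (d+1) 1).map
            (fun k => ((if pvQ x == k then (1:Int) else 0) +
                        (L.map (fun x => if pvQ x == k then (1:Int) else 0)).sum)
                      * pvCnt l (d - k))).sum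
          = ((PySem.List.pyRange 0 (d+1) 1).map
              (fun k => (if pvQ x == k then (1:Int) else 0) * pvCnt l (d - k))).sum
            + ((PySem.List.pyRange 0 (d+1) 1).map
              (fun k => ((L.map (fun x => if pvQ x == k then (1:Int) else 0)).sum)
                        * pvCnt l (d - k))).sum := by
      rw [← List.sum_map_add]
      apply congrArg
      apply List.map_congr_left
      intro k _
      ring
    rw [hsplit, ← ih]
    congr 1
    have hq0 := pvQ_nonneg x
    by_cases hqd : pvQ x ≤ d
    · exact (pv_pick_mem (fun k => pvCnt l (d - k)) (pvQ x) _
        (PySem.List.nodup_pyRange_one 0 (d+1))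
        ((PySem.List.mem_pyRange_one).mpr ⟨hq0, by omega⟩)).symm
    · rw [pv_pick_not (fun k => pvCnt l (d - k)) (pvQ x) _
        (fun hmem => hqd (by have := (PySem.List.mem_pyRange_one).mp hmem; omega))]
      exact pvCnt_neg l _ (by omega)

theorem pv_convolution (d : Int) (l : List Int) :
    ((pvT l).map (fun x => pvCnt l (d - pvQ x))).sum
      = ((PySem.List.pyRange 0 (d+1) 1).map (fun k => pvCnt l k * pvCnt l (d - k))).sum := by
  rw [pv_regroup d l (pvT l)]
  apply congrArg
  apply List.map_congr_left
  intro k _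
  rfl

-- ===== VERDICT (by name: the statement is the Claim_ definition above) =====
theorem r6_spec : Claim_equal_r6 := by
  intro d _ hd
  unfold Spec_r6
  rw [r6_eq_sum d, r6_alt_eq_sum d hd, pv_convolution d]
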